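-- pv_equiv track=rewrite | github.com/slepoi-kamin/landing_load_calculator | dl_functions.py | clear_duplicates_bycol
-- ===== SOURCE A (Python) =====
-- def clear_duplicates_bycol(data, n_col=0):
--     """
--     Функция фильтрующая строки с повторяющимися в столбце значениями.
--
--     Parameters
--     ----------
--     data : Список
--         Исходный список
--     n_col : номер столбца, optional
--         Номер столбца, в котором производится поиск повторяющихся значений.
--         The default is 0.
--
--     Returns
--     -------
--     clear_data : Список
--         Отфильтрованный список.
--
--     """
--     clear_data = []
--     for i in range(len(data) - 1):
--         if data[i][n_col] == data[i + 1][n_col]: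
--             pass
--         else:
--             clear_data.append(data[i])
--     clear_data.append(data[len(data) - 1])
--
--     return clear_data
-- ===== SOURCE B (Python) =====
-- def clear_duplicates_bycol(data, n_col=0):
--     # Stage 1: materialize the maximal runs of consecutive rows with equal column value.
--     groups = []
--     for row in data:
--         if groups and groups[-1][0][n_col] == row[n_col]:
--             groups[-1].append(row)
--         else:
--             groups.append([row])
--     # Stage 2: keep the last row of each run.
--     return [g[-1] for g in groups]
-- ===== Notes on version B (the rewrite author's own statement) =====
-- stated objective: alternative
-- what changed: B first materializes the maximal runs of consecutive rows with equal column value as an explicit list of groups (each new row is appended to the current group or opens a new one, keyed on the group's first row), then a second pass returns the last row of each group; A is a single index loop comparing each row with its successor plus a separate final append.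
import Mathlib
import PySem

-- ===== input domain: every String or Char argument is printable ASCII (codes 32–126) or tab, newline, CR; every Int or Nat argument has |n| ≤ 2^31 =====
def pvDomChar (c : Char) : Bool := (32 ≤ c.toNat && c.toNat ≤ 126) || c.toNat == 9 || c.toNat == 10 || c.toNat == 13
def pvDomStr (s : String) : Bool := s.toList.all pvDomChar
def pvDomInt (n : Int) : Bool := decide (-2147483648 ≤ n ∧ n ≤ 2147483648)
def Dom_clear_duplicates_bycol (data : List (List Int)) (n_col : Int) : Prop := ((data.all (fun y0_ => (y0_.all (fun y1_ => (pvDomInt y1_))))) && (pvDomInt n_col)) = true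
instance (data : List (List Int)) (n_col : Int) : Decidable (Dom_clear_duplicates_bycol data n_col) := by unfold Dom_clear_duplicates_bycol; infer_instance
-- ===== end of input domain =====

-- B groups the rows into the maximal runs of consecutive equal column values in a first pass,
-- then returns the last row of each run; A is an index loop comparing each row with its successor.

-- ===== PORT A =====
-- literal port of A: for i in range(len(data)-1): append data[i] unless data[i][n_col] == data[i+1][n_col]; then append data[len(data)-1]
def clear_duplicates_bycol (data : List (List Int)) (n_col : Int) : List (List Int) :=
  let clear_data :=
    (PySem.List.pyRange 0 ((data.length : Int) - 1) 1).foldl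
      (fun acc i =>
        if PySem.List.pyGetD (PySem.List.pyGetD data i []) n_col 0 =
           PySem.List.pyGetD (PySem.List.pyGetD data (i + 1) []) n_col 0
        then acc
        else acc ++ [PySem.List.pyGetD data i []]) []
  clear_data ++ [PySem.List.pyGetD data ((data.length : Int) - 1) []]

-- ===== PORT B =====
-- literal port of Source B: build groups (append row to groups[-1] when groups nonempty and
-- groups[-1][0][n_col] == row[n_col], else open a new group [row]), then [g[-1] for g in groups]
def clear_duplicates_bycol_alt (data : List (List Int)) (n_col : Int) : List (List Int) :=
  let groups : List (List (List Int)) :=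
    data.foldl
      (fun gs row =>
        if gs ≠ [] ∧
           PySem.List.pyGetD (PySem.List.pyGetD (PySem.List.pyGetD gs (-1) []) 0 []) n_col 0 =
             PySem.List.pyGetD row n_col 0
        then PySem.List.pySetD gs (-1) (PySem.List.pyGetD gs (-1) [] ++ [row])
        else gs ++ [[row]]) []
  groups.map (fun g => PySem.List.pyGetD g (-1) [])

-- ===== PRECONDITION & SPEC =====
-- Pre_: exactly the inputs where A returns normally: data nonempty (else data[len(data)-1]
-- raises IndexError) and, when there are at least two rows, n_col a valid (possibly negative)
-- index into every row (with a single row neither program reads the column).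
def Pre_clear_duplicates_bycol (data : List (List Int)) (n_col : Int) : Prop :=
  data ≠ [] ∧
    (data.length = 1 ∨ ∀ r ∈ data, -(r.length : Int) ≤ n_col ∧ n_col < (r.length : Int))
instance (data : List (List Int)) (n_col : Int) : Decidable (Pre_clear_duplicates_bycol data n_col) := by unfold Pre_clear_duplicates_bycol; infer_instance
def pvWitness_clear_duplicates_bycol : List (List Int) × Int := ([[1, 5], [1, 6], [2, 7]], 0)

def Spec_clear_duplicates_bycol (data : List (List Int)) (n_col : Int) (out : List (List Int)) : Prop := out = clear_duplicates_bycol_alt data n_col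
instance (data : List (List Int)) (n_col : Int) (out : List (List Int)) : Decidable (Spec_clear_duplicates_bycol data n_col out) := by unfold Spec_clear_duplicates_bycol; infer_instance

-- ===== CLAIM (what is proved, stated in full; the proofs are below) =====
def Claim_equal_clear_duplicates_bycol : Prop := ∀ (data : List (List Int)) (n_col : Int), Dom_clear_duplicates_bycol data n_col → Pre_clear_duplicates_bycol data n_col → Spec_clear_duplicates_bycol data n_col (clear_duplicates_bycol data n_col)
-- ===== LEMMAS AND PROOFS =====

-- key of a row, as both ports compute it
def pvKey (n_col : Int) (r : List Int) : Int := PySem.List.pyGetD r n_col 0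

-- the common normal form: last row of every maximal run of equal keys
def pvS (n_col : Int) : List Int → List (List Int) → List (List Int)
  | r, [] => [r]
  | r, s :: rest => if pvKey n_col r = pvKey n_col s then pvS n_col s rest else r :: pvS n_col s rest

theorem pySetD_append_neg_one {α : Type} (ys : List α) (r v : α) :
    PySem.List.pySetD (ys ++ [r]) (-1) v = ys ++ [v] := by
  simp [PySem.List.pySetD, PySem.List.pySet?, PySem.List.pyIdx?]

theorem pyGetD_zero_append {α : Type} [Inhabited α] (p : List α) (r d : α) :
    PySem.List.pyGetD (p ++ [r]) 0 d = (p ++ [r]).headD d := by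
  cases p <;> simp [PySem.List.pyGetD_zero]

-- A's loop, after the pyRange/cast bookkeeping: a foldl over List.range
def pvFold (n_col : Int) (xs init : List (List Int)) (n : Nat) : List (List Int) :=
  (List.range n).foldl
    (fun acc k =>
      if pvKey n_col (xs.getD k []) = pvKey n_col (xs.getD (k + 1) []) then acc
      else acc ++ [xs.getD k []]) init

theorem pvFold_init (n_col : Int) (xs : List (List Int)) (n : Nat) (init : List (List Int)) :
    pvFold n_col xs init n = init ++ pvFold n_col xs [] n := by
  unfold pvFold
  generalize List.range n = l
  induction l generalizing init with
  | nil => simp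
  | cons k l ih =>
    simp only [List.foldl_cons]
    by_cases h : pvKey n_col (xs.getD k []) = pvKey n_col (xs.getD (k + 1) [])
    · simp only [if_pos h]; exact ih init
    · simp only [if_neg h, List.nil_append]
      rw [ih (init ++ [xs.getD k []]), ih [xs.getD k []], List.append_assoc]

theorem a_unfold (n_col : Int) (xs : List (List Int)) :
    clear_duplicates_bycol xs n_col =
      pvFold n_col xs [] (xs.length - 1) ++ [PySem.List.pyGetD xs ((xs.length : Int) - 1) []] := by
  unfold clear_duplicates_bycol pvFold
  have h1 : ((xs.length : Int) - 1 - 0).toNat = xs.length - 1 := by omega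
  rw [PySem.List.pyRange_one, h1, List.foldl_map]
  have hcong := PySem.List.foldl_congr_mem (List.range (xs.length - 1))
    (fun (acc : List (List Int)) (y : Nat) =>
      if PySem.List.pyGetD (PySem.List.pyGetD xs (0 + (y : Int)) []) n_col 0 =
         PySem.List.pyGetD (PySem.List.pyGetD xs (0 + (y : Int) + 1) []) n_col 0
      then acc else acc ++ [PySem.List.pyGetD xs (0 + (y : Int)) []])
    (fun acc k =>
      if pvKey n_col (xs.getD k []) = pvKey n_col (xs.getD (k + 1) []) then acc
      else acc ++ [xs.getD k []])
    []
    (by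
      intro acc k _
      simp only [zero_add]
      rw [show ((k : Int) + 1) = ((k + 1 : Nat) : Int) by push_cast; ring]
      simp only [PySem.List.pyGetD_natCast]
      simp [pvKey])
  rw [hcong]

theorem pvFold_cons (n_col : Int) (r : List Int) (t : List (List Int)) (n : Nat) :
    pvFold n_col (r :: t) [] (n + 1) =
      (if pvKey n_col r = pvKey n_col (t.getD 0 []) then [] else [r]) ++ pvFold n_col t [] n := by
  rw [show pvFold n_col (r :: t) [] (n + 1) =
      (List.range n).foldl
        (fun acc k =>
          if pvKey n_col (t.getD k []) = pvKey n_col (t.getD (k + 1) []) then acc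
          else acc ++ [t.getD k []])
        (if pvKey n_col r = pvKey n_col (t.getD 0 []) then [] else [r]) from ?_]
  · exact pvFold_init n_col t n _
  · unfold pvFold
    rw [List.range_succ_eq_map, List.foldl_cons, List.foldl_map]
    simp

theorem a_cons_cons (n_col : Int) (r s : List Int) (rest : List (List Int)) :
    clear_duplicates_bycol (r :: s :: rest) n_col =
      (if pvKey n_col r = pvKey n_col s then [] else [r]) ++
        clear_duplicates_bycol (s :: rest) n_col := by
  rw [a_unfold, a_unfold]
  have hl1 : (r :: s :: rest).length - 1 = rest.length + 1 := by simp
  have hl2 : (s :: rest).length - 1 = rest.length := by simp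
  have hc1 : ((r :: s :: rest).length : Int) - 1 = ((rest.length + 1 : Nat) : Int) := by
    simp only [List.length_cons]; push_cast; ring
  have hc2 : ((s :: rest).length : Int) - 1 = ((rest.length : Nat) : Int) := by
    simp only [List.length_cons]; push_cast; ring
  rw [hl1, hl2, hc1, hc2, pvFold_cons]
  simp only [PySem.List.pyGetD_natCast]
  simp [List.append_assoc]
  rfl

theorem a_eq_pvS (n_col : Int) (r : List Int) (rest : List (List Int)) :
    clear_duplicates_bycol (r :: rest) n_col = pvS n_col r rest := by
  induction rest generalizing r with
  | nil =>
    simp [clear_duplicates_bycol, pvS, PySem.List.pyRange_one_eq_nil]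
  | cons s rest ih =>
    rw [a_cons_cons, ih, pvS]
    by_cases h : pvKey n_col r = pvKey n_col s <;> simp [h]

-- B's grouping fold: invariant — the state is ys ++ [p ++ [r]] (current run p ++ [r], whose
-- first row has the same key as its last row r); taking the last of each group yields
-- ys.map last ++ pvS n_col r rest.
theorem b_invariant (n_col : Int) (rest : List (List Int)) (ys : List (List (List Int)))
    (p : List (List Int)) (r : List Int)
    (hhead : pvKey n_col ((p ++ [r]).headD []) = pvKey n_col r) :
    (rest.foldl
      (fun gs row =>
        if gs ≠ [] ∧
           PySem.List.pyGetD (PySem.List.pyGetD (PySem.List.pyGetD gs (-1) []) 0 []) n_col 0 =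
             PySem.List.pyGetD row n_col 0
        then PySem.List.pySetD gs (-1) (PySem.List.pyGetD gs (-1) [] ++ [row])
        else gs ++ [[row]]) (ys ++ [p ++ [r]])).map (fun g => PySem.List.pyGetD g (-1) []) =
      ys.map (fun g => PySem.List.pyGetD g (-1) []) ++ pvS n_col r rest := by
  induction rest generalizing ys p r with
  | nil => simp [pvS, PySem.List.pyGetD_neg_one_append_singleton]
  | cons row rest ih =>
    simp only [List.foldl_cons]
    rw [PySem.List.pyGetD_neg_one_append_singleton, pyGetD_zero_append]
    by_cases h : pvKey n_col r = pvKey n_col row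
    · rw [if_pos ⟨by simp, hhead.trans h⟩, pySetD_append_neg_one]
      have hh2 : pvKey n_col ((p ++ [r] ++ [row]).headD []) = pvKey n_col row := by
        cases p with
        | nil => simpa using h
        | cons x t => simpa using hhead.trans h
      rw [ih ys (p ++ [r]) row hh2, pvS, if_pos h]
    · rw [if_neg (fun hc => h (hhead.symm.trans hc.2))]
      have := ih (ys ++ [p ++ [r]]) [] row (by simp)
      simp only [List.nil_append] at this
      rw [this, pvS, if_neg h]
      simp [PySem.List.pyGetD_neg_one_append_singleton]

theorem b_eq_pvS (n_col : Int) (r : List Int) (rest : List (List Int)) :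
    clear_duplicates_bycol_alt (r :: rest) n_col = pvS n_col r rest := by
  unfold clear_duplicates_bycol_alt
  simp only [List.foldl_cons]
  rw [if_neg (by simp)]
  have := b_invariant n_col rest [] [] r (by simp)
  simpa using this

-- ===== VERDICT (by name: the statement is the Claim_ definition above) =====
theorem clear_duplicates_bycol_spec : Claim_equal_clear_duplicates_bycol := by
  intro data n_col _ hpre
  unfold Spec_clear_duplicates_bycol
  obtain ⟨hne, -⟩ := hpre
  cases data with
  | nil => exact absurd rfl hne
  | cons r rest => rw [a_eq_pvS, b_eq_pvS]
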